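-- pv_equiv track=rewrite | github.com/kparkerNRO/fs-organizer | organizer/utils/filename_utils.py | get_max_common_words
-- ===== SOURCE A (Python) =====
-- def get_max_common_words(tokens, name_to_comp):
--     base_token = tokens[0]
--     working_token = [base_token]
--     lower_tokens = [token.lower() for token in tokens]
--
--     lower_name = name_to_comp.lower()
--     lower_comp_tokens = lower_name.split(" ")
--
--     # greedily add tokens until they stop matching
--     for i in range(1, len(tokens) + 1):
--         test_tokens = lower_tokens[0:i]
--         lower_comp_test_tokens = lower_comp_tokens[0:i]
--         if lower_comp_test_tokens == test_tokens:
--             working_token = lower_tokens[0:i]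
--         else:
--             break
--
--     shared_tokens = " ".join(tokens[: len(working_token)])
--     return shared_tokens
-- ===== SOURCE B (Python) =====
-- def get_max_common_words(tokens, name_to_comp):
--     comp_tokens = name_to_comp.lower().split(" ")
--     k = 0
--     for t, c in zip(tokens, comp_tokens):
--         if t.lower() != c:
--             break
--         k += 1
--     return " ".join(tokens[:max(1, k)])
-- ===== Notes on version B (the rewrite author's own statement) =====
-- stated objective: faster
-- what changed: A rebuilds and compares ever-growing prefix slices for each i (quadratic); B does one zip-scan over tokens and the split name, counting matching tokens until the first mismatch, then joins tokens[:max(1,k)].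
import Mathlib
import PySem

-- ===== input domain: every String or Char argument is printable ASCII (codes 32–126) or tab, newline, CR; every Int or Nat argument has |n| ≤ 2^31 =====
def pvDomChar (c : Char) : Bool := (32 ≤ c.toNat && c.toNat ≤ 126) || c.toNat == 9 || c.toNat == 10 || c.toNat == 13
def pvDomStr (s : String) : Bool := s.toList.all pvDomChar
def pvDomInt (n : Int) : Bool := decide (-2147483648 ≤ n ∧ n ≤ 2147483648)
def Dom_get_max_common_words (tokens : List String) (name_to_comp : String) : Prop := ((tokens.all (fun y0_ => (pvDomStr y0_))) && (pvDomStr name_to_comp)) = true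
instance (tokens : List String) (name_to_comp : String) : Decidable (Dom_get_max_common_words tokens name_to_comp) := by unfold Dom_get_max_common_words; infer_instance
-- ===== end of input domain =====

-- B replaces A's quadratic loop of growing prefix-slice comparisons by a single
-- token-by-token scan counting matches until the first mismatch (objective: faster).

-- ===== PORT A =====
-- A's greedy loop: for i in range(1, len(tokens)+1): compare slices, extend working or break.
def pvLoopA (lower_tokens lower_comp_tokens : List String) : List Int → List String → List String
  | [], working => working
  | i :: rest, working =>
    if PySem.List.slice lower_comp_tokens (some 0) (some i) = PySem.List.slice lower_tokens (some 0) (some i) then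
      pvLoopA lower_tokens lower_comp_tokens rest (PySem.List.slice lower_tokens (some 0) (some i))
    else working

def get_max_common_words (tokens : List String) (name_to_comp : String) : String :=
  let base_token := (PySem.List.pyGet? tokens 0).getD ""   -- tokens[0]; none (IndexError) excluded by Pre_
  let working_token := [base_token]
  let lower_tokens := tokens.map PySem.Str.lower
  let lower_name := PySem.Str.lower name_to_comp
  let lower_comp_tokens := (PySem.Str.split? lower_name " ").getD []   -- sep " " ≠ "", so split? is some
  let working := pvLoopA lower_tokens lower_comp_tokens
      (PySem.List.pyRange 1 ((tokens.length : Int) + 1) 1) working_token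
  PySem.Str.join " " (PySem.List.slice tokens none (some (working.length : Int)))

-- ===== PORT B =====
-- B's single scan: count matching tokens (zip + break in Source B).
def pvCountB : List String → List String → Nat
  | t :: ts, c :: cs => if PySem.Str.lower t = c then pvCountB ts cs + 1 else 0
  | _, _ => 0

def get_max_common_words_alt (tokens : List String) (name_to_comp : String) : String :=
  let comp_tokens := (PySem.Str.split? (PySem.Str.lower name_to_comp) " ").getD []   -- sep " " ≠ "", so split? is some
  let k := pvCountB tokens comp_tokens
  PySem.Str.join " " (tokens.take (max 1 k))

-- ===== PRECONDITION & SPEC =====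
-- A evaluates tokens[0]: it raises IndexError on an empty tokens list, so Pre_ excludes [].
def Pre_get_max_common_words (tokens : List String) (name_to_comp : String) : Prop := tokens ≠ []
instance (tokens : List String) (name_to_comp : String) : Decidable (Pre_get_max_common_words tokens name_to_comp) := by unfold Pre_get_max_common_words; infer_instance

def pvWitness_get_max_common_words : List String × String := (["Foo", "bar"], "foo Bar baz")

def Spec_get_max_common_words (tokens : List String) (name_to_comp : String) (out : String) : Prop := out = get_max_common_words_alt tokens name_to_comp
instance (tokens : List String) (name_to_comp : String) (out : String) : Decidable (Spec_get_max_common_words tokens name_to_comp out) := by unfold Spec_get_max_common_words; infer_instance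

-- ===== CLAIM (what is proved, stated in full; the proofs are below) =====
def Claim_equal_get_max_common_words : Prop := ∀ (tokens : List String) (name_to_comp : String), Dom_get_max_common_words tokens name_to_comp → Pre_get_max_common_words tokens name_to_comp → Spec_get_max_common_words tokens name_to_comp (get_max_common_words tokens name_to_comp)

-- ===== LEMMAS AND PROOFS =====

-- common-prefix length of two lists (proof-side characterisation of both loops)
def pvCpl : List String → List String → Nat
  | a :: as, b :: bs => if a = b then pvCpl as bs + 1 else 0
  | _, _ => 0

theorem pvCountB_eq_cpl (ts cs : List String) :
    pvCountB ts cs = pvCpl (ts.map PySem.Str.lower) cs := by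
  induction ts generalizing cs with
  | nil => cases cs <;> simp [pvCountB, pvCpl]
  | cons t ts ih =>
    cases cs with
    | nil => simp [pvCountB, pvCpl]
    | cons c cs => simp [pvCountB, pvCpl, ih]

theorem pvCpl_le_length (lt ct : List String) : pvCpl lt ct ≤ lt.length := by
  induction lt generalizing ct with
  | nil => cases ct <;> simp [pvCpl]
  | cons a as ih =>
    cases ct with
    | nil => simp [pvCpl]
    | cons b bs =>
      simp only [pvCpl, List.length_cons]
      split_ifs with h
      · have := ih bs; omega
      · omega

theorem pv_take_eq_iff (lt ct : List String) (i : Nat) (hi : i ≤ lt.length) :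
    (ct.take i = lt.take i ↔ i ≤ pvCpl lt ct) := by
  induction lt generalizing ct i with
  | nil =>
    have h0 : i = 0 := Nat.le_zero.mp hi
    subst h0
    cases ct <;> simp [pvCpl]
  | cons a as ih =>
    cases i with
    | zero => simp
    | succ i =>
      cases ct with
      | nil => simp [pvCpl]
      | cons b bs =>
        simp only [List.take_succ_cons, pvCpl]
        constructor
        · intro h
          have hb : b = a := by simpa using congrArg (fun l => l.headI) h
          have ht : bs.take i = as.take i := by simpa using congrArg List.tail h
          subst hb
          rw [if_pos rfl]
          have := (ih bs i (by simpa using hi)).mp ht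
          omega
        · intro h
          split_ifs at h with hab
          · subst hab
            have := (ih bs i (by simpa using hi)).mpr (by omega)
            simp [this]
          · omega

-- loop characterisation: starting at index j (1 ≤ j ≤ n+1, n = lt.length),
-- the loop's final working list has length pvCpl lt ct if iteration j matches, else w's.
theorem pvLoopA_length (lt ct : List String) (j : Nat) (hj : 1 ≤ j)
    (hjn : j ≤ lt.length + 1) (w : List String) :
    (pvLoopA lt ct (PySem.List.pyRange (j : Int) ((lt.length : Int) + 1) 1) w).length =
      if j ≤ pvCpl lt ct then pvCpl lt ct else w.length := by
  have hk := pvCpl_le_length lt ct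
  by_cases hend : j = lt.length + 1
  · subst hend
    rw [PySem.List.pyRange_one_eq_nil (by omega)]
    simp only [pvLoopA]
    rw [if_neg (by omega)]
  · have hjlt : j ≤ lt.length := by omega
    rw [PySem.List.pyRange_one_cons (by push_cast; omega)]
    simp only [pvLoopA]
    simp only [PySem.List.slice_zero_start, PySem.List.slice_to_natCast]
    have hcast : ((j : Int) + 1) = (((j + 1 : Nat)) : Int) := by push_cast; ring
    by_cases hmatch : j ≤ pvCpl lt ct
    · rw [if_pos ((pv_take_eq_iff lt ct j hjlt).mpr hmatch)]
      rw [hcast]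
      rw [pvLoopA_length lt ct (j + 1) (by omega) (by omega) (lt.take j)]
      by_cases h2 : j + 1 ≤ pvCpl lt ct
      · rw [if_pos h2, if_pos hmatch]
      · rw [if_neg h2, if_pos hmatch]
        have hje : j = pvCpl lt ct := by omega
        simp [hje, List.length_take, Nat.min_eq_left hk]
    · rw [if_neg (fun h => hmatch ((pv_take_eq_iff lt ct j hjlt).mp h))]
      rw [if_neg hmatch]
termination_by lt.length + 1 - j

theorem get_max_common_words_spec : Claim_equal_get_max_common_words := by
  intro tokens name_to_comp _ hpre
  unfold Spec_get_max_common_words get_max_common_words get_max_common_words_alt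
  simp only []
  set lt := tokens.map PySem.Str.lower with hlt
  set ct := (PySem.Str.split? (PySem.Str.lower name_to_comp) " ").getD [] with hct
  have hlen : lt.length = tokens.length := by simp [hlt]
  have hn : 1 ≤ tokens.length := by
    cases tokens with
    | nil => exact absurd rfl hpre
    | cons _ _ => simp
  have hL := pvLoopA_length lt ct 1 (le_refl 1) (by omega)
      [(PySem.List.pyGet? tokens 0).getD ""]
  rw [hlen] at hL
  rw [show ((1 : Nat) : Int) = (1 : Int) from rfl] at hL
  rw [hL]
  have hk := pvCpl_le_length lt ct
  rw [hlen] at hk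
  have hcount : pvCountB tokens ct = pvCpl lt ct := pvCountB_eq_cpl tokens ct
  rw [hcount]
  by_cases h1 : 1 ≤ pvCpl lt ct
  · rw [if_pos h1, PySem.List.slice_to_natCast]
    have hmax : max 1 (pvCpl lt ct) = pvCpl lt ct := by omega
    rw [hmax]
  · rw [if_neg h1]
    have h0 : pvCpl lt ct = 0 := by omega
    simp only [List.length_cons, List.length_nil, Nat.zero_add, h0]
    rw [PySem.List.slice_to_natCast]
    norm_num
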